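-- pv_equiv track=rewrite | github.com/Ysh096/swea | 4047_영준이의카드카운팅/s1.py | card_check
-- ===== SOURCE A (Python) =====
-- def card_check(cards):
--     card_dict = {'S': [], 'D': [], 'H': [], 'C': []}
--     for i in range(len(cards)):
--         if i % 3 == 0:
--             tmp_key = cards[i]
--         elif i % 3 == 1:
--             tmp_val = cards[i]
--         elif i % 3 == 2:
--             tmp_val += cards[i]
--             card_dict[tmp_key].append(tmp_val)
--     #card_dict에 데이터가 저장된 형태는
--     #{'S': ['01'], 'H': ['03', '04'], 'D': ['02'], 'C': []}
--     for value in card_dict.values():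
--         if len(set(value)) != len(value):
--             return ['ERROR']
--     #ERROR가 나지 않으면 다음의 동작을 수행한다.
--     order = ['S', 'D', 'H', 'C']
--     result = []
--     for i in range(4):
--         result.append(13 - len(card_dict[order[i]]))
--     return result
-- ===== SOURCE B (Python) =====
-- def card_check(cards):
--     # One pass over 3-char chunks with a set per suit; duplicate detection is
--     # folded into the parse and reported immediately (same value as A: ['ERROR']).
--     suits = {'S': set(), 'D': set(), 'H': set(), 'C': set()}
--     for i in range(len(cards) // 3):
--         chunk = cards[3 * i:3 * i + 3]
--         nums = suits[chunk[0]]  # unknown suit -> KeyError, like A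
--         num = chunk[1:3]
--         if num in nums:
--             return ['ERROR']
--         nums.add(num)
--     return [13 - len(suits[k]) for k in ('S', 'D', 'H', 'C')]
-- ===== Notes on version B (the rewrite author's own statement) =====
-- stated objective: alternative
-- what changed: A runs a char-by-char mod-3 state machine building per-suit lists, then a second pass over dict values to detect duplicates, then an index loop over an order list; B makes one pass over 3-char chunks keeping a set per suit, detecting a duplicate immediately at insertion, and builds the result with a comprehension. B matches A exactly everywhere A returns, including returning the same ['ERROR'] on duplicate cards; …
-- outside the precondition, e.g. on card_check('S01S01'): A returns ['ERROR'], B returns ['ERROR']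
import Mathlib
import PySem

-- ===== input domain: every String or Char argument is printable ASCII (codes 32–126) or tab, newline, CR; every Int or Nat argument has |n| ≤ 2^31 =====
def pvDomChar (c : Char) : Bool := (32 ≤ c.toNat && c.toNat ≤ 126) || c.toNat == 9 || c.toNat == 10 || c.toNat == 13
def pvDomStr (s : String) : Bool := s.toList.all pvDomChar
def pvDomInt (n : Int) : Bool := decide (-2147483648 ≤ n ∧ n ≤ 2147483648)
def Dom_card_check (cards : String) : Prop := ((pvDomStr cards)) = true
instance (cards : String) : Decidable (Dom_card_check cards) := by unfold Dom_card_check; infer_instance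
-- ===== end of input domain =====

-- B replaces A's char-by-char mod-3 state machine plus separate duplicate pass by one pass
-- over 3-char chunks with a set per suit (duplicate detected at insertion). The Python B
-- returns A's exact value on every input A returns on, including ['ERROR'] on duplicates;
-- the duplicate case lies outside Pre_ only because that agreed value is a list of STRINGS,
-- which the declared Lean return type List Int cannot represent.

-- ===== PORT A =====
def pvDictA0 : PySem.Dict Char (List (List Char)) :=
  PySem.Dict.ofList [('S', []), ('D', []), ('H', []), ('C', [])]

-- one iteration of A's "for i in range(len(cards))" loop; state = (tmp_key, tmp_val, card_dict)
def pvStepA (cs : List Char) (st : Char × List Char × PySem.Dict Char (List (List Char)))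
    (i : Int) : Char × List Char × PySem.Dict Char (List (List Char)) :=
  let c := PySem.List.pyGetD cs i ' '   -- cards[i]; i ∈ range(len(cards)) is in range
  if PySem.Int.mod i 3 = 0 then (c, st.2.1, st.2.2)
  else if PySem.Int.mod i 3 = 1 then (st.1, [c], st.2.2)
  else
    let v := st.2.1 ++ [c]             -- tmp_val += cards[i]
    -- card_dict[tmp_key].append(tmp_val); missing key = KeyError, outside Pre_
    (st.1, v, if st.2.2.contains st.1 then st.2.2.modify st.1 [] (· ++ [v]) else st.2.2)

def card_check (cards : String) : List Int :=
  let cs := cards.toList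
  let st := (PySem.List.pyRange 0 (PySem.List.len cs) 1).foldl (pvStepA cs) (' ', [], pvDictA0)
  let d := st.2.2
  -- for value in card_dict.values(): if len(set(value)) != len(value): return ['ERROR']
  if d.values.any (fun v => PySem.List.len (PySem.Set.ofList v) != PySem.List.len v) then
    []  -- Python returns ['ERROR'], a list of strings, unrepresentable in List Int: outside Pre_
  else
    let order := ['S', 'D', 'H', 'C']
    (PySem.List.pyRange 0 4 1).foldl
      (fun r i => r ++ [13 - PySem.List.len (d.getD (PySem.List.pyGetD order i ' ') [])]) []

-- ===== PORT B =====
def pvDictB0 : PySem.Dict Char (PySem.Set (List Char)) :=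
  PySem.Dict.ofList [('S', []), ('D', []), ('H', []), ('C', [])]

-- one iteration of B's chunk loop; none = B already returned ['ERROR']
def pvStepB (cs : List Char) (st : Option (PySem.Dict Char (PySem.Set (List Char))))
    (i : Int) : Option (PySem.Dict Char (PySem.Set (List Char))) :=
  match st with
  | none => none
  | some d =>
    let chunk := PySem.List.slice cs (some (3 * i)) (some (3 * i + 3))
    match d.get? (PySem.List.pyGetD chunk 0 ' ') with  -- suits[chunk[0]]; missing key = KeyError, outside Pre_
    | none => some d
    | some s =>
      let num := PySem.List.slice chunk (some 1) (some 3)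
      if PySem.Set.contains s num then none
      else some (d.insert (PySem.List.pyGetD chunk 0 ' ') (PySem.Set.add s num))

def card_check_alt (cards : String) : List Int :=
  let cs := cards.toList
  match (PySem.List.pyRange 0 (PySem.Int.floordiv (PySem.List.len cs) 3) 1).foldl
      (pvStepB cs) (some pvDictB0) with
  | none => []  -- Python returns ['ERROR'], same value as A there: outside Pre_
  | some d => ['S', 'D', 'H', 'C'].map (fun k => 13 - PySem.List.len (d.getD k PySem.Set.empty))

-- ===== PRECONDITION & SPEC =====
-- the list of complete 3-char chunks of the input, as (suit, two-char number) pairs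
def pvChunks (cs : List Char) : List (Char × List Char) :=
  (List.range (cs.length / 3)).map
    (fun k => (cs.getD (3 * k) ' ', [cs.getD (3 * k + 1) ' ', cs.getD (3 * k + 2) ' ']))

-- Pre_ excludes inputs where A raises KeyError (a chunk's suit not in 'SDHC') and inputs with a
-- duplicated chunk: on the latter A and B both return the SAME value ['ERROR'] (the Python B
-- reproduces A there), but that value is a list of strings, not a value of the declared Lean
-- return type List Int, so the Lean claim cannot cover those inputs.
def Pre_card_check (cards : String) : Prop :=
  (∀ p ∈ pvChunks cards.toList, p.1 = 'S' ∨ p.1 = 'D' ∨ p.1 = 'H' ∨ p.1 = 'C') ∧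
  (pvChunks cards.toList).Nodup

instance (cards : String) : Decidable (Pre_card_check cards) := by
  unfold Pre_card_check; infer_instance

def pvWitness_card_check : String := "S01D02H01"

def Spec_card_check (cards : String) (out : List Int) : Prop := out = card_check_alt cards
instance (cards : String) (out : List Int) : Decidable (Spec_card_check cards out) := by
  unfold Spec_card_check; infer_instance

-- ===== CLAIM (what is proved, stated in full; the proofs are below) =====
def Claim_equal_card_check : Prop :=
  ∀ (cards : String), Dom_card_check cards → Pre_card_check cards →
    Spec_card_check cards (card_check cards)


-- ===== LEMMAS AND PROOFS =====

-- A's guarded append step (card_dict[tmp_key].append(...) with the KeyError guard)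
def pvGStep (d : PySem.Dict Char (List (List Char))) (p : Char × List Char) :
    PySem.Dict Char (List (List Char)) :=
  if d.contains p.1 then d.modify p.1 [] (· ++ [p.2]) else d

-- the per-suit list of card numbers among the first k chunks
def pvVal (cs : List Char) (k : Nat) (c : Char) : List (List Char) :=
  (((pvChunks cs).take k).filter (fun p => p.1 == c)).map (·.2)

theorem pvChunks_length (cs : List Char) : (pvChunks cs).length = cs.length / 3 := by
  simp [pvChunks]

theorem pvChunks_getElem (cs : List Char) (k : Nat) (h : k < cs.length / 3) :
    (pvChunks cs)[k]'(by simpa [pvChunks_length] using h) =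
      (cs.getD (3 * k) ' ', [cs.getD (3 * k + 1) ' ', cs.getD (3 * k + 2) ' ']) := by
  simp [pvChunks]

theorem pvDropTake3 (cs : List Char) (m : Nat) (h : m + 3 ≤ cs.length) :
    (cs.drop m).take 3 = [cs.getD m ' ', cs.getD (m + 1) ' ', cs.getD (m + 2) ' '] := by
  have h0 : m < cs.length := by omega
  have h1 : m + 1 < cs.length := by omega
  have h2 : m + 2 < cs.length := by omega
  rw [List.drop_eq_getElem_cons h0, List.drop_eq_getElem_cons h1, List.drop_eq_getElem_cons h2,
    List.getD_eq_getElem _ _ h0, List.getD_eq_getElem _ _ h1, List.getD_eq_getElem _ _ h2]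
  rfl

-- A's dict is untouched on loop steps with i % 3 ≠ 2
theorem pvStepA_dict (cs : List Char) (st : Char × List Char × PySem.Dict Char (List (List Char)))
    (i : Int) (h : PySem.Int.mod i 3 ≠ 2) : (pvStepA cs st i).2.2 = st.2.2 := by
  have hb : 0 ≤ PySem.Int.mod i 3 ∧ PySem.Int.mod i 3 < 3 :=
    ⟨PySem.Int.mod_nonneg i (by norm_num), PySem.Int.mod_lt i (by norm_num)⟩
  unfold pvStepA
  split_ifs with h0 h1 <;> simp_all
  omega

-- A's loop over the first 3*k characters: the dict is pvGStep folded over the first k chunks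
theorem pvFoldA (cs : List Char) (k : Nat) (hk : k ≤ cs.length / 3) :
    ∃ kv : Char × List Char,
      ((PySem.List.pyRange 0 (3 * (k : Int)) 1).foldl (pvStepA cs) (' ', [], pvDictA0)) =
        (kv.1, kv.2, ((pvChunks cs).take k).foldl pvGStep pvDictA0) := by
  induction k with
  | zero => exact ⟨(' ', []), by simp [PySem.List.pyRange_one_eq_nil]⟩
  | succ k ih =>
    obtain ⟨kv, hkv⟩ := ih (by omega)
    have hkn : k < (pvChunks cs).length := by rw [pvChunks_length]; omega
    have hsplit : PySem.List.pyRange 0 (3 * ((k : Int) + 1)) 1 =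
        PySem.List.pyRange 0 (3 * (k : Int)) 1 ++
          [3 * (k : Int), 3 * (k : Int) + 1, 3 * (k : Int) + 2] := by
      have htail : PySem.List.pyRange (3 * (k : Int)) (3 * ((k : Int) + 1)) 1 =
          [3 * (k : Int), 3 * (k : Int) + 1, 3 * (k : Int) + 2] := by
        rw [PySem.List.pyRange_one_cons (by omega), PySem.List.pyRange_one_cons (by omega),
          PySem.List.pyRange_one_cons (by omega), PySem.List.pyRange_one_eq_nil (by omega)]
        norm_num
        omega
      rw [PySem.List.pyRange_one_append 0 (3 * (k : Int)) (3 * ((k : Int) + 1)) (by omega)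
        (by omega), htail]
    have hlen : 3 * k + 2 < cs.length := by
      have := (Nat.le_div_iff_mul_le (by norm_num : 0 < 3)).mp hk
      omega
    have hc : ∀ j : Nat, PySem.List.pyGetD cs ((3 * k : Nat) + (j : Int)) ' ' = cs.getD (3 * k + j) ' ' := by
      intro j
      rw [show ((3 * k : Nat) : Int) + (j : Int) = ((3 * k + j : Nat) : Int) by push_cast; ring,
        PySem.List.pyGetD_natCast]
    have htake : (pvChunks cs).take (k + 1) = (pvChunks cs).take k ++
        [(cs.getD (3 * k) ' ', [cs.getD (3 * k + 1) ' ', cs.getD (3 * k + 2) ' '])] := by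
      rw [List.take_add_one]
      simp [List.getElem?_eq_getElem hkn, pvChunks_getElem cs k (by omega)]
    refine ⟨(cs.getD (3 * k) ' ', [cs.getD (3 * k + 1) ' ', cs.getD (3 * k + 2) ' ']), ?_⟩
    push_cast
    rw [hsplit, List.foldl_append, hkv, htake, List.foldl_append]
    have h0 := hc 0; have h1 := hc 1; have h2 := hc 2
    push_cast at h0 h1 h2
    simp only [add_zero] at h0
    simp [List.foldl, pvStepA, pvGStep, h0, h1, h2]

-- A's full loop: trailing 1 or 2 characters never touch the dict
theorem pvFoldA_full (cs : List Char) :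
    ∃ kv : Char × List Char,
      ((PySem.List.pyRange 0 (PySem.List.len cs) 1).foldl (pvStepA cs) (' ', [], pvDictA0)) =
        (kv.1, kv.2, ((pvChunks cs).take (cs.length / 3)).foldl pvGStep pvDictA0) := by
  obtain ⟨kv, hkv⟩ := pvFoldA cs (cs.length / 3) le_rfl
  have h3n : 3 * (cs.length / 3) ≤ cs.length := by omega
  have hsplit := PySem.List.pyRange_one_append 0 (3 * ((cs.length / 3 : Nat) : Int))
    ((cs.length : Nat) : Int) (by positivity) (by exact_mod_cast h3n)
  have hrem : ∀ i ∈ PySem.List.pyRange (3 * ((cs.length / 3 : Nat) : Int)) ((cs.length : Nat) : Int) 1,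
      PySem.Int.mod i 3 ≠ 2 := by
    intro i hi
    rw [PySem.List.mem_pyRange_one] at hi
    rw [PySem.Int.mod_eq_emod_of_pos (by norm_num : (0:Int) < 3)]
    omega
  have hdict : ∀ (l : List Int) (st : Char × List Char × PySem.Dict Char (List (List Char))),
      (∀ i ∈ l, PySem.Int.mod i 3 ≠ 2) → (l.foldl (pvStepA cs) st).2.2 = st.2.2 := by
    intro l
    induction l with
    | nil => intro st _; rfl
    | cons x xs ih =>
      intro st h
      rw [List.foldl_cons, ih _ (fun i hi => h i (List.mem_cons_of_mem _ hi)),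
        pvStepA_dict cs st x (h x List.mem_cons_self)]
  refine ⟨?_, ?_⟩
  · exact (((PySem.List.pyRange (3 * ((cs.length / 3 : Nat) : Int)) ((cs.length : Nat) : Int) 1).foldl
      (pvStepA cs) (kv.1, kv.2, ((pvChunks cs).take (cs.length / 3)).foldl pvGStep pvDictA0)).1,
      ((PySem.List.pyRange (3 * ((cs.length / 3 : Nat) : Int)) ((cs.length : Nat) : Int) 1).foldl
      (pvStepA cs) (kv.1, kv.2, ((pvChunks cs).take (cs.length / 3)).foldl pvGStep pvDictA0)).2.1)
  · simp only [PySem.List.len_eq, hsplit, List.foldl_append, hkv]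
    have hd := hdict (PySem.List.pyRange (3 * ((cs.length / 3 : Nat) : Int)) ((cs.length : Nat) : Int) 1)
      (kv.1, kv.2, ((pvChunks cs).take (cs.length / 3)).foldl pvGStep pvDictA0) hrem
    exact Prod.ext rfl (Prod.ext rfl hd)

-- with all suits among the keys, the guard never fires
theorem pvGFold_eq_modify (l : List (Char × List Char)) (d : PySem.Dict Char (List (List Char)))
    (hl : ∀ p ∈ l, d.contains p.1 = true) :
    l.foldl pvGStep d = l.foldl (fun d p => d.modify p.1 [] (· ++ [p.2])) d := by
  induction l generalizing d with
  | nil => rfl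
  | cons p l ih =>
    rw [List.foldl_cons, List.foldl_cons, show pvGStep d p = d.modify p.1 [] (· ++ [p.2]) from by
      simp [pvGStep, hl p List.mem_cons_self]]
    exact ih _ (fun q hq => by
      rw [PySem.Dict.contains_modify]
      simp [hl q (List.mem_cons_of_mem _ hq)])

theorem pvFoldA_getD (cs : List Char)
    (hs : ∀ p ∈ pvChunks cs, p.1 = 'S' ∨ p.1 = 'D' ∨ p.1 = 'H' ∨ p.1 = 'C') (c : Char)
    (hc : c = 'S' ∨ c = 'D' ∨ c = 'H' ∨ c = 'C') :
    (((pvChunks cs).take (cs.length / 3)).foldl pvGStep pvDictA0).getD c [] =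
      pvVal cs (cs.length / 3) c := by
  have hcont : ∀ p ∈ (pvChunks cs).take (cs.length / 3), pvDictA0.contains p.1 = true := by
    intro p hp
    rcases hs p (List.mem_of_mem_take hp) with h | h | h | h <;> rw [h] <;> decide
  rw [pvGFold_eq_modify _ _ hcont, PySem.Dict.getD_foldl_modify_append]
  have h0 : pvDictA0.getD c [] = [] := by rcases hc with h | h | h | h <;> rw [h] <;> decide
  rw [h0]
  rfl

theorem pvFoldA_keys (cs : List Char)
    (hs : ∀ p ∈ pvChunks cs, p.1 = 'S' ∨ p.1 = 'D' ∨ p.1 = 'H' ∨ p.1 = 'C') :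
    (((pvChunks cs).take (cs.length / 3)).foldl pvGStep pvDictA0).keys = ['S', 'D', 'H', 'C'] := by
  have hcont : ∀ p ∈ (pvChunks cs).take (cs.length / 3), pvDictA0.contains p.1 = true := by
    intro p hp
    rcases hs p (List.mem_of_mem_take hp) with h | h | h | h <;> rw [h] <;> decide
  rw [pvGFold_eq_modify _ _ hcont,
    PySem.Dict.keys_foldl_modify_key ((pvChunks cs).take (cs.length / 3)) (·.1)]
  have hk : pvDictA0.keys = ['S', 'D', 'H', 'C'] := by decide
  rw [hk]
  have hmem : ∀ x ∈ ((pvChunks cs).take (cs.length / 3)).map (·.1), x ∈ (['S','D','H','C'] : List Char) := by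
    intro x hx
    obtain ⟨p, hp, rfl⟩ := List.mem_map.mp hx
    rcases hs p (List.mem_of_mem_take hp) with h | h | h | h <;> simp [h]
  generalize ((pvChunks cs).take (cs.length / 3)).map (·.1) = xs at hmem
  induction xs with
  | nil => rfl
  | cons x xs ih =>
    rw [PySem.Set.update_cons, PySem.Set.add_of_mem (hmem x List.mem_cons_self)]
    exact ih (fun y hy => hmem y (List.mem_cons_of_mem _ hy))

theorem pvVal_nodup (cs : List Char) (hnd : (pvChunks cs).Nodup) (k : Nat) (c : Char) :
    (pvVal cs k c).Nodup := by
  have h1 : (((pvChunks cs).take k).filter (fun p => p.1 == c)).Nodup :=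
    ((List.take_sublist _ _).nodup hnd).filter _
  refine h1.map_on ?_
  intro x hx y hy hxy
  have hxc : x.1 = c := by simpa using (List.of_mem_filter hx)
  have hyc : y.1 = c := by simpa using (List.of_mem_filter hy)
  exact Prod.ext (hxc.trans hyc.symm) hxy

-- B's loop invariant
theorem pvFoldB (cs : List Char)
    (hs : ∀ p ∈ pvChunks cs, p.1 = 'S' ∨ p.1 = 'D' ∨ p.1 = 'H' ∨ p.1 = 'C')
    (hnd : (pvChunks cs).Nodup) (k : Nat) (hk : k ≤ cs.length / 3) :
    ∃ d : PySem.Dict Char (PySem.Set (List Char)),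
      ((PySem.List.pyRange 0 (k : Int) 1).foldl (pvStepB cs) (some pvDictB0)) = some d ∧
      ∀ c, (c = 'S' ∨ c = 'D' ∨ c = 'H' ∨ c = 'C') → d.get? c = some (pvVal cs k c) := by
  induction k with
  | zero =>
    refine ⟨pvDictB0, by simp [PySem.List.pyRange_one_eq_nil], ?_⟩
    intro c hc
    have hv : pvVal cs 0 c = [] := by simp [pvVal]
    rw [hv]
    rcases hc with h | h | h | h <;> rw [h] <;> decide
  | succ k ih =>
    obtain ⟨d, hd, hget⟩ := ih (by omega)
    have hkn : k < (pvChunks cs).length := by rw [pvChunks_length]; omega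
    have hlen : 3 * k + 3 ≤ cs.length := by
      have := (Nat.le_div_iff_mul_le (by norm_num : 0 < 3)).mp hk
      omega
    -- the k-th chunk
    have hchunkk := pvChunks_getElem cs k (by omega)
    have hsuit : (pvChunks cs)[k].1 = 'S' ∨ (pvChunks cs)[k].1 = 'D' ∨
        (pvChunks cs)[k].1 = 'H' ∨ (pvChunks cs)[k].1 = 'C' :=
      hs _ (List.getElem_mem hkn)
    -- the slice computes the k-th chunk
    have hslice : PySem.List.slice cs (some (3 * (k : Int))) (some (3 * (k : Int) + 3)) =
        [cs.getD (3 * k) ' ', cs.getD (3 * k + 1) ' ', cs.getD (3 * k + 2) ' '] := by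
      rw [show (3 * (k : Int)) = ((3 * k : Nat) : Int) by push_cast; ring,
        show ((3 * k : Nat) : Int) + 3 = ((3 * k : Nat) : Int) + ((3 : Nat) : Int) by norm_num,
        PySem.List.slice_natCast_add, pvDropTake3 cs (3 * k) hlen]
    -- the k-th chunk is not among the first k
    have hnotink : (pvChunks cs)[k] ∉ (pvChunks cs).take k := by
      have hsplit := List.take_append_drop k (pvChunks cs)
      have hdisj : List.Disjoint ((pvChunks cs).take k) ((pvChunks cs).drop k) := by
        refine List.disjoint_of_nodup_append ?_
        rw [hsplit]; exact hnd
      have hmemdrop : (pvChunks cs)[k] ∈ (pvChunks cs).drop k := by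
        have h0 : ((pvChunks cs).drop k)[0]'(by simp; omega) = (pvChunks cs)[k] := by
          simp
        rw [← h0]; exact List.getElem_mem _
      exact fun hmem => hdisj hmem hmemdrop
    -- the number of the k-th chunk is not in the suit's set so far
    have hnotin : [cs.getD (3 * k + 1) ' ', cs.getD (3 * k + 2) ' '] ∉
        pvVal cs k ((pvChunks cs)[k].1) := by
      intro hmem
      obtain ⟨p, hp, hp2⟩ := List.mem_map.mp hmem
      have hp1 : p.1 = (pvChunks cs)[k].1 := by simpa using List.of_mem_filter hp
      have hpeq : p = (pvChunks cs)[k] := by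
        refine Prod.ext hp1 ?_
        rw [hp2, hchunkk]
      exact hnotink (hpeq ▸ List.mem_of_mem_filter hp)
    have hcontf : PySem.Set.contains (pvVal cs k ((pvChunks cs)[k].1))
        [cs.getD (3 * k + 1) ' ', cs.getD (3 * k + 2) ' '] = false := by
      rw [← Bool.not_eq_true, PySem.Set.contains_iff]
      exact hnotin
    -- unfold one step of B's loop
    have hstep : pvStepB cs (some d) (k : Int) =
        some (d.insert ((pvChunks cs)[k].1)
          (PySem.Set.add (pvVal cs k ((pvChunks cs)[k].1))
            [cs.getD (3 * k + 1) ' ', cs.getD (3 * k + 2) ' '])) := by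
      have hg := hget _ hsuit
      have hnum : PySem.List.slice
          [cs.getD (3 * k) ' ', cs.getD (3 * k + 1) ' ', cs.getD (3 * k + 2) ' ']
          (some 1) (some 3) = [cs.getD (3 * k + 1) ' ', cs.getD (3 * k + 2) ' '] := by
        rw [PySem.List.slice_toNat _ (a := 1) (b := 3) (by norm_num) (by norm_num)]
        rfl
      have hsuitc : cs.getD (3 * k) ' ' = (pvChunks cs)[k].1 := by rw [hchunkk]
      simp only [pvStepB, hslice, PySem.List.pyGetD_zero_cons]
      rw [hnum, hsuitc, hg]
      simp only [hcontf]
      simp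
    refine ⟨d.insert ((pvChunks cs)[k].1)
      (PySem.Set.add (pvVal cs k ((pvChunks cs)[k].1))
        [cs.getD (3 * k + 1) ' ', cs.getD (3 * k + 2) ' ']), ?_, ?_⟩
    · rw [show ((k + 1 : Nat) : Int) = (k : Int) + 1 by push_cast; ring,
        PySem.List.pyRange_one_succ_right (by positivity), List.foldl_append, hd,
        List.foldl_cons, List.foldl_nil, hstep]
    · intro c hc
      have htake1 : (pvChunks cs).take (k + 1) = (pvChunks cs).take k ++ [(pvChunks cs)[k]] := by
        rw [List.take_add_one, List.getElem?_eq_getElem hkn]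
        simp
      by_cases hceq : c = (pvChunks cs)[k].1
      · subst hceq
        rw [PySem.Dict.get?_insert_self]
        congr 1
        rw [PySem.Set.add_of_not_mem hnotin]
        unfold pvVal
        rw [htake1, List.filter_append, List.map_append, List.filter_cons]
        simp [hchunkk]
      · rw [PySem.Dict.get?_insert_of_ne _ _ hceq, hget c hc]
        congr 1
        unfold pvVal
        rw [htake1, List.filter_append, List.filter_cons]
        have hf : ((pvChunks cs)[k].1 == c) = false := by
          simp
          exact fun h => hceq h.symm
        simp [hf]


-- ===== VERDICT (by name: the statement is the Claim_ definition above) =====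
theorem card_check_spec : Claim_equal_card_check := by
  intro cards _ hpre
  obtain ⟨hs, hnd⟩ := hpre
  unfold Spec_card_check
  set cs := cards.toList with hcs
  set n := cs.length / 3 with hn
  -- characterize A's dict
  obtain ⟨kv, hkv⟩ := pvFoldA_full cs
  set dA := ((pvChunks cs).take n).foldl pvGStep pvDictA0 with hdA
  have hkeys := pvFoldA_keys cs hs
  have hkeysnd : dA.keys.Nodup := by rw [← hdA] at hkeys; rw [hkeys]; decide
  have hgetD : ∀ c, (c = 'S' ∨ c = 'D' ∨ c = 'H' ∨ c = 'C') → dA.getD c [] = pvVal cs n c :=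
    fun c hc => pvFoldA_getD cs hs c hc
  have hvalues : dA.values = [pvVal cs n 'S', pvVal cs n 'D', pvVal cs n 'H', pvVal cs n 'C'] := by
    rw [PySem.Dict.values_eq_map_keys dA hkeysnd []]
    rw [← hdA] at hkeys
    rw [hkeys]
    simp [hgetD 'S' (by simp), hgetD 'D' (by simp), hgetD 'H' (by simp), hgetD 'C' (by simp)]
  have hnodupv : ∀ c, (pvVal cs n c).Nodup := fun c => pvVal_nodup cs hnd n c
  have hanyf : (dA.values.any
      (fun v => PySem.List.len (PySem.Set.ofList v) != PySem.List.len v)) = false := by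
    rw [hvalues]
    simp only [List.any_cons, List.any_nil, Bool.or_eq_false_iff]
    refine ⟨?_, ?_, ?_, ?_, by simp⟩ <;>
      rw [@PySem.Set.ofList_eq_self_of_nodup (List Char) List.instBEq _ _ (hnodupv _)] <;> simp
  -- characterize B's dict
  obtain ⟨dB, hdB, hgetB⟩ := pvFoldB cs hs hnd n le_rfl
  have hB : card_check_alt cards =
      [13 - PySem.List.len (pvVal cs n 'S'), 13 - PySem.List.len (pvVal cs n 'D'),
        13 - PySem.List.len (pvVal cs n 'H'), 13 - PySem.List.len (pvVal cs n 'C')] := by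
    unfold card_check_alt
    dsimp only
    rw [← hcs]
    have hfd : PySem.Int.floordiv (PySem.List.len cs) 3 = ((n : Nat) : Int) := by
      rw [PySem.List.len_eq, show ((3:Int)) = ((3:Nat):Int) by norm_num,
        PySem.Int.floordiv_natCast]
    rw [hfd, hdB]
    have hD : ∀ c, (c = 'S' ∨ c = 'D' ∨ c = 'H' ∨ c = 'C') →
        dB.getD c ([] : PySem.Set (List Char)) = pvVal cs n c := by
      intro c hc
      rw [PySem.Dict.getD_eq_get?_getD, hgetB c hc]
      rfl
    simp [hD 'S' (by simp), hD 'D' (by simp), hD 'H' (by simp), hD 'C' (by simp)]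
  -- put A together
  unfold card_check
  dsimp only
  rw [← hcs, hkv]
  simp only [hanyf, Bool.false_eq_true, if_false]
  have hr : PySem.List.pyRange 0 4 1 = [0, 1, 2, 3] := by decide
  rw [hr, hB]
  simp only [List.foldl]
  have g0 : PySem.List.pyGetD ['S','D','H','C'] (0 : Int) ' ' = 'S' := by decide
  have g1 : PySem.List.pyGetD ['S','D','H','C'] (1 : Int) ' ' = 'D' := by decide
  have g2 : PySem.List.pyGetD ['S','D','H','C'] (2 : Int) ' ' = 'H' := by decide
  have g3 : PySem.List.pyGetD ['S','D','H','C'] (3 : Int) ' ' = 'C' := by decide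
  rw [g0, g1, g2, g3, hgetD 'S' (by simp), hgetD 'D' (by simp), hgetD 'H' (by simp),
    hgetD 'C' (by simp)]
  simp
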